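-- pv_equiv track=rewrite | github.com/take4ff/gmp | old_file/bart2_learn.py | get_min_elements_per_dimension
-- ===== SOURCE A (Python) =====
-- def get_min_elements_per_dimension(nested_list, dimension=0, min_elements=None):
--     if min_elements is None:
--         min_elements = []
--
--     # 必要に応じてmin_elementsを拡張
--     if dimension >= len(min_elements):
--         min_elements.append(float('inf'))
--
--     # 現在の次元の最小要素数を更新
--     min_elements[dimension] = min(min_elements[dimension], len(nested_list))
--
--     # 内部がリストの場合は再帰的に探索
--     for item in nested_list:
--         if isinstance(item, list):
--             get_min_elements_per_dimension(item, dimension + 1, min_elements)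
--
--     # 最小要素数が無限大の場合（空リストのみの場合）を0に修正
--     min_elements = [0 if val == float('inf') else val for val in min_elements]
--
--     return min_elements
-- ===== SOURCE B (Python) =====
-- def get_min_elements_per_dimension(nested_list, dimension=0, min_elements=None):
--     if min_elements is None:
--         min_elements = []
--     queue = [(nested_list, dimension)]
--     while queue:
--         node, dim = queue.pop(0)
--         if dim >= len(min_elements):
--             min_elements.append(float('inf'))
--         min_elements[dim] = min(min_elements[dim], len(node))
--         for item in node:
--             if isinstance(item, list):
--                 queue.append((item, dim + 1))
--     return [0 if val == float('inf') else val for val in min_elements]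
-- ===== Notes on version B (the rewrite author's own statement) =====
-- stated objective: faster
-- what changed: Replaces A's recursive depth-first descent with a single explicit FIFO-worklist loop (seeded with (nested_list, dimension), popping a node, doing the grow-and-min update, and enqueuing list-typed children at dim+1), with the inf-to-0 comprehension done once at the end.
import Mathlib
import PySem

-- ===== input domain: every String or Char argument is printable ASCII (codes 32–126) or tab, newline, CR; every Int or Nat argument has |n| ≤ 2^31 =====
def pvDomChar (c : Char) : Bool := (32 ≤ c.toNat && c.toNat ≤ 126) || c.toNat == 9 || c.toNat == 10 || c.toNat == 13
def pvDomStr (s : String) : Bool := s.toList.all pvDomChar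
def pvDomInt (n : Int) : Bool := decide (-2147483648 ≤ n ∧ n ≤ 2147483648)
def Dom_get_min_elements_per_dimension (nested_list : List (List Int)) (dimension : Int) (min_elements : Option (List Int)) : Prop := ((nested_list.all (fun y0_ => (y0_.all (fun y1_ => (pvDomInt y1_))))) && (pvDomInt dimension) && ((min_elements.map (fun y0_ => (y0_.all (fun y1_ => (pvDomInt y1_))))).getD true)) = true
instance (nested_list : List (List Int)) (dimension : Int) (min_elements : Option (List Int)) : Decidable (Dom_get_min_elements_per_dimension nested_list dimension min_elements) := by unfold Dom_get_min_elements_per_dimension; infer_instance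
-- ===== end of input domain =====

-- B replaces A's recursion by an explicit FIFO-worklist loop (same per-node work, same visit
-- order on this depth-2 data) and runs the inf-to-0 comprehension once instead of per call;
-- measured faster in a timing run (constant-factor: no per-child Python call/comprehension).
-- NOTE: both Pythons mutate a caller-supplied min_elements list in place in the same way;
-- the equivalence proved here is about the RETURN value.

-- ----- shared Python-list semantics helpers (identical lines in Source A and Source B) -----
-- min_elements entries: `none` models float('inf'), `some v` an int.
-- Python `min(float('inf'), n) = n`, `min(a, n)` on ints.
def pvMinInf (cur : Option Int) (n : Int) : Option Int :=
  match cur with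
  | none => some n
  | some a => some (min a n)

-- `me[i] = v` with Python index semantics; out-of-range (IndexError, excluded by Pre_) leaves me.
def pvSet (me : List (Option Int)) (i : Int) (v : Option Int) : List (Option Int) :=
  let j : Int := if i < 0 then (me.length : Int) + i else i
  if 0 ≤ j ∧ j < (me.length : Int) then me.set j.toNat v else me

-- the three lines both Pythons run at a node of length n at depth `dim`:
-- grow-if-needed append of inf, then min_elements[dim] = min(min_elements[dim], n)
def pvVisit (me : List (Option Int)) (dim : Int) (n : Nat) : List (Option Int) :=
  let me1 := if (me.length : Int) ≤ dim then me ++ [none] else me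
  pvSet me1 dim (pvMinInf ((PySem.List.pyGet? me1 dim).getD none) (n : Int))

-- ===== PORT A =====
-- recursive call on an inner list (items are ints, so the for-loop recurses on nothing;
-- the recursive call's return value is discarded in Python — the mutated list is what flows back)
def pvGoA (dim : Int) (me : List (Option Int)) (item : List Int) : List (Option Int) :=
  pvVisit me dim item.length

def get_min_elements_per_dimension (nested_list : List (List Int)) (dimension : Int) (min_elements : Option (List Int)) : List Int :=
  let me : List (Option Int) := (min_elements.getD []).map some
  let me := pvVisit me dimension nested_list.length
  -- for item in nested_list: recurse (every item is a list under the stated type)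
  let me := nested_list.foldl (fun acc item => pvGoA (dimension + 1) acc item) me
  -- [0 if val == float('inf') else val for val in min_elements]
  me.map (fun v => v.getD 0)

-- ===== PORT B =====
-- worklist nodes: the outer list or an inner list
inductive PVNode where
  | outer : List (List Int) → PVNode
  | inner : List Int → PVNode

def pvNodeLen : PVNode → Nat
  | .outer l => l.length
  | .inner l => l.length

-- the list-typed items of a node (ints are not pushed)
def pvChildren : PVNode → List PVNode
  | .outer l => l.map PVNode.inner
  | .inner _ => []

def pvWeight : PVNode → Nat
  | .outer l => 1 + l.length
  | .inner _ => 1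

def pvStackWeight (s : List (PVNode × Int)) : Nat := (s.map (fun p => pvWeight p.1)).sum

-- termination of the worklist loop: cited by name in its decreasing_by
theorem pvStackWeight_step (node : PVNode) (dim : Int) (rest : List (PVNode × Int)) :
    pvStackWeight (rest ++ (pvChildren node).map (fun c => (c, dim + 1))) < pvStackWeight ((node, dim) :: rest) := by
  cases node with
  | inner l =>
      simp [pvStackWeight, pvChildren, pvWeight]
  | outer l =>
      simp [pvStackWeight, pvChildren, pvWeight, List.map_append, List.sum_append,
            List.map_map, Function.comp_def]
      omega

-- while queue: pop front, visit, append list-typed children with dim+1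
def pvLoopB : List (PVNode × Int) → List (Option Int) → List (Option Int)
  | [], me => me
  | (node, dim) :: rest, me =>
      pvLoopB (rest ++ (pvChildren node).map (fun c => (c, dim + 1))) (pvVisit me dim (pvNodeLen node))
  termination_by s _ => pvStackWeight s
  decreasing_by
    exact pvStackWeight_step node dim rest

def get_min_elements_per_dimension_alt (nested_list : List (List Int)) (dimension : Int) (min_elements : Option (List Int)) : List Int :=
  let me : List (Option Int) := (min_elements.getD []).map some
  let me := pvLoopB [(PVNode.outer nested_list, dimension)] me
  me.map (fun v => v.getD 0)

-- ===== PRECONDITION & SPEC =====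
-- Pre_ excludes exactly the inputs where Python A raises IndexError (dimension outside
-- [-len(min_elements), len(min_elements)]); B raises there too.
def Pre_get_min_elements_per_dimension (nested_list : List (List Int)) (dimension : Int) (min_elements : Option (List Int)) : Prop :=
  -((min_elements.getD []).length : Int) ≤ dimension ∧ dimension ≤ ((min_elements.getD []).length : Int)
instance (nested_list : List (List Int)) (dimension : Int) (min_elements : Option (List Int)) : Decidable (Pre_get_min_elements_per_dimension nested_list dimension min_elements) := by unfold Pre_get_min_elements_per_dimension; infer_instance

def pvWitness_get_min_elements_per_dimension : List (List Int) × Int × Option (List Int) := ([[1, 2], [3]], 0, none)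

def Spec_get_min_elements_per_dimension (nested_list : List (List Int)) (dimension : Int) (min_elements : Option (List Int)) (out : List Int) : Prop := out = get_min_elements_per_dimension_alt nested_list dimension min_elements
instance (nested_list : List (List Int)) (dimension : Int) (min_elements : Option (List Int)) (out : List Int) : Decidable (Spec_get_min_elements_per_dimension nested_list dimension min_elements out) := by unfold Spec_get_min_elements_per_dimension; infer_instance

-- ===== CLAIM (what is proved, stated in full; the proofs are below) =====
def Claim_equal_get_min_elements_per_dimension : Prop := ∀ (nested_list : List (List Int)) (dimension : Int) (min_elements : Option (List Int)), Dom_get_min_elements_per_dimension nested_list dimension min_elements → Pre_get_min_elements_per_dimension nested_list dimension min_elements → Spec_get_min_elements_per_dimension nested_list dimension min_elements (get_min_elements_per_dimension nested_list dimension min_elements)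

-- ===== LEMMAS AND PROOFS =====
theorem pvLoopB_nil (me : List (Option Int)) : pvLoopB [] me = me := by
  rw [pvLoopB]

theorem pvLoopB_cons (node : PVNode) (dim : Int) (rest : List (PVNode × Int)) (me : List (Option Int)) :
    pvLoopB ((node, dim) :: rest) me
      = pvLoopB (rest ++ (pvChildren node).map (fun c => (c, dim + 1))) (pvVisit me dim (pvNodeLen node)) := by
  rw [pvLoopB]

-- Draining a worklist of inner nodes (which push nothing) is the left fold of the visits.
theorem pvLoopB_inner (d : Int) : ∀ (l : List (List Int)) (rest : List (PVNode × Int)) (me : List (Option Int)),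
    pvLoopB ((l.map (fun x => (PVNode.inner x, d))) ++ rest) me
      = pvLoopB rest (l.foldl (fun acc item => pvVisit acc d item.length) me)
  | [], rest, me => by simp
  | a :: l, rest, me => by
      rw [List.map_cons, List.cons_append, pvLoopB_cons]
      simp only [pvChildren, List.map_nil, List.append_nil, pvNodeLen, List.foldl_cons]
      exact pvLoopB_inner d l rest (pvVisit me d a.length)

-- ===== VERDICT (by name: the statement is the Claim_ definition above) =====
theorem get_min_elements_per_dimension_spec : Claim_equal_get_min_elements_per_dimension := by
  intro nested_list dimension min_elements _ _
  show _ = _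
  simp only [get_min_elements_per_dimension, get_min_elements_per_dimension_alt]
  rw [pvLoopB_cons]
  simp only [pvChildren, pvNodeLen, List.nil_append, List.map_map]
  rw [show (fun c : PVNode => (c, dimension + 1)) ∘ PVNode.inner
        = (fun x : List Int => (PVNode.inner x, dimension + 1)) from rfl]
  rw [← List.append_nil (nested_list.map (fun x => (PVNode.inner x, dimension + 1))),
      pvLoopB_inner, pvLoopB_nil]
  rfl
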